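-- pv_equiv track=rewrite | github.com/hyeeun1031/coding-practice | 프로그래머스/0/181829. 이차원 배열 대각선 순회하기/이차원 배열 대각선 순회하기.py | solution
-- ===== SOURCE A (Python) =====
-- def solution(board, k):
--     n,m = len(board), len(board[0])
--     s = 0
--
--     for i in range(n):
--         for j in range(m):
--             if i + j <= k:
--                 s += board[i][j]
--     return s
-- ===== SOURCE B (Python) =====
-- def solution(board, k):
--     n, m = len(board), len(board[0])
--     s = 0
--     for d in range(min(k, n + m - 2) + 1):
--         for i in range(max(0, d - (m - 1)), min(d, n - 1) + 1):
--             s += board[i][d - i]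
--     return s
-- ===== Notes on version B (the rewrite author's own statement) =====
-- stated objective: alternative
-- what changed: Replaces A's row-major double loop with a per-cell i+j<=k test by an anti-diagonal traversal: d runs over 0..min(k, n+m-2) and for each diagonal i runs over max(0, d-(m-1))..min(d, n-1) with j = d-i, visiting exactly the cells with i+j<=k without ever testing the condition.
import Mathlib
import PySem

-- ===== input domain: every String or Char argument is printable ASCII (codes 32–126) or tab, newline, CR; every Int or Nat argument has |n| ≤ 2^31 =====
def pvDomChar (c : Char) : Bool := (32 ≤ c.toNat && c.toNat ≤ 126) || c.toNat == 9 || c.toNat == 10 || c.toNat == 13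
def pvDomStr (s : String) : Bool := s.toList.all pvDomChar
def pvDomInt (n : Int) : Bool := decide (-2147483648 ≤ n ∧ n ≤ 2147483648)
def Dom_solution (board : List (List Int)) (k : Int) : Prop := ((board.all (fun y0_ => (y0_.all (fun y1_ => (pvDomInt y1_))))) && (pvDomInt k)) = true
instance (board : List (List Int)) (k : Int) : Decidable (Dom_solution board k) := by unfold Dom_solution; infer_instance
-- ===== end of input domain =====

-- B traverses the board anti-diagonal by anti-diagonal (d = i+j from 0 to min(k, n+m-2)) instead of
-- row-major with a per-cell i+j<=k test (objective: alternative, same complexity).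

-- ===== PORT A =====
-- Literal port of A: n,m = len(board), len(board[0]); nested index loops, per-cell test i+j<=k.
def solution (board : List (List Int)) (k : Int) : Int :=
  let n : Int := (board.length : Int)
  let m : Int := ((PySem.List.pyGetD board 0 []).length : Int)
  (PySem.List.pyRange 0 n 1).foldl
    (fun s i =>
      (PySem.List.pyRange 0 m 1).foldl
        (fun s j =>
          if i + j ≤ k then s + PySem.List.pyGetD (PySem.List.pyGetD board i []) j 0 else s)
        s)
    0

-- ===== PORT B =====
-- Literal port of B: for d in range(min(k,n+m-2)+1): for i in range(max(0,d-(m-1)), min(d,n-1)+1): s += board[i][d-i].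
def solution_alt (board : List (List Int)) (k : Int) : Int :=
  let n : Int := (board.length : Int)
  let m : Int := ((PySem.List.pyGetD board 0 []).length : Int)
  (PySem.List.pyRange 0 (min k (n + m - 2) + 1) 1).foldl
    (fun s d =>
      (PySem.List.pyRange (max 0 (d - (m - 1))) (min d (n - 1) + 1) 1).foldl
        (fun s i => s + PySem.List.pyGetD (PySem.List.pyGetD board i []) (d - i) 0)
        s)
    0

-- ===== PRECONDITION & SPEC =====
-- Pre_ excludes exactly the inputs where A raises IndexError: the empty board (board[0]),
-- and ragged boards where some row i is shorter than len(board[0]) yet the loop reaches index len(row_i) (i.e. k - i ≥ len(row_i)).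
def Pre_solution (board : List (List Int)) (k : Int) : Prop :=
  board ≠ [] ∧
    ∀ p ∈ PySem.List.enumerate board 0,
      ((PySem.List.pyGetD board 0 []).length : Int) ≤ (p.2.length : Int) ∨ k - p.1 < (p.2.length : Int)
instance (board : List (List Int)) (k : Int) : Decidable (Pre_solution board k) := by
  unfold Pre_solution; infer_instance
def pvWitness_solution : List (List Int) × Int := ([[1, 2], [3, 4]], 1)

def Spec_solution (board : List (List Int)) (k : Int) (out : Int) : Prop := out = solution_alt board k
instance (board : List (List Int)) (k : Int) (out : Int) : Decidable (Spec_solution board k out) := by unfold Spec_solution; infer_instance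

-- ===== CLAIM (what is proved, stated in full; the proofs are below) =====
def Claim_equal_solution : Prop := ∀ (board : List (List Int)) (k : Int), Dom_solution board k → Pre_solution board k → Spec_solution board k (solution board k)

-- ===== LEMMAS AND PROOFS =====

-- the cell value board[i][j] as the ports read it
def gcell (board : List (List Int)) (i j : Int) : Int :=
  PySem.List.pyGetD (PySem.List.pyGetD board i []) j 0

theorem toFinset_pyRange (a b : Int) :
    (PySem.List.pyRange a b 1).toFinset = Finset.Ico a b := by
  ext x
  simp [PySem.List.mem_pyRange_one, Finset.mem_Ico]

theorem sum_map_pyRange (f : Int → Int) (a b : Int) :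
    ((PySem.List.pyRange a b 1).map f).sum = ∑ x ∈ Finset.Ico a b, f x := by
  rw [← List.sum_toFinset f (PySem.List.nodup_pyRange_one a b), toFinset_pyRange]

theorem A_eq (board : List (List Int)) (k : Int) :
    solution board k
      = ∑ i ∈ Finset.Ico (0 : Int) (board.length : Int),
          ∑ j ∈ Finset.Ico (0 : Int) ((PySem.List.pyGetD board 0 []).length : Int),
            (if i + j ≤ k then gcell board i j else 0) := by
  unfold solution
  simp only []
  have hinner : ∀ (i s : Int),
      (PySem.List.pyRange 0 ((PySem.List.pyGetD board 0 []).length : Int)).foldl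
        (fun s j => if i + j ≤ k then s + PySem.List.pyGetD (PySem.List.pyGetD board i []) j 0 else s) s
      = s + ∑ j ∈ Finset.Ico (0 : Int) ((PySem.List.pyGetD board 0 []).length : Int),
              (if i + j ≤ k then gcell board i j else 0) := by
    intro i s
    have hbody :
        (fun (s j : Int) => if i + j ≤ k then s + PySem.List.pyGetD (PySem.List.pyGetD board i []) j 0 else s)
        = (fun (s j : Int) => s + (if i + j ≤ k then gcell board i j else 0)) := by
      funext s j
      unfold gcell
      split <;> simp
    rw [hbody, PySem.List.foldl_add, sum_map_pyRange]
  have houter :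
      (fun (s i : Int) =>
        (PySem.List.pyRange 0 ((PySem.List.pyGetD board 0 []).length : Int)).foldl
          (fun s j => if i + j ≤ k then s + PySem.List.pyGetD (PySem.List.pyGetD board i []) j 0 else s) s)
      = (fun (s i : Int) => s + ∑ j ∈ Finset.Ico (0 : Int) ((PySem.List.pyGetD board 0 []).length : Int),
              (if i + j ≤ k then gcell board i j else 0)) := by
    funext s i
    exact hinner i s
  rw [houter, PySem.List.foldl_add, sum_map_pyRange]
  simp

theorem B_eq (board : List (List Int)) (k : Int) :
    solution_alt board k
      = ∑ d ∈ Finset.Ico (0 : Int) (min k ((board.length : Int) + ((PySem.List.pyGetD board 0 []).length : Int) - 2) + 1),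
          ∑ i ∈ Finset.Ico (max 0 (d - (((PySem.List.pyGetD board 0 []).length : Int) - 1)))
                           (min d ((board.length : Int) - 1) + 1),
            gcell board i (d - i) := by
  unfold solution_alt
  simp only []
  have hinner : ∀ (d s : Int),
      (PySem.List.pyRange (max 0 (d - (((PySem.List.pyGetD board 0 []).length : Int) - 1)))
          (min d ((board.length : Int) - 1) + 1)).foldl
        (fun s i => s + PySem.List.pyGetD (PySem.List.pyGetD board i []) (d - i) 0) s
      = s + ∑ i ∈ Finset.Ico (max 0 (d - (((PySem.List.pyGetD board 0 []).length : Int) - 1)))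
                             (min d ((board.length : Int) - 1) + 1),
              gcell board i (d - i) := by
    intro d s
    rw [PySem.List.foldl_add, sum_map_pyRange]
    rfl
  have houter :
      (fun (s d : Int) =>
        (PySem.List.pyRange (max 0 (d - (((PySem.List.pyGetD board 0 []).length : Int) - 1)))
            (min d ((board.length : Int) - 1) + 1)).foldl
          (fun s i => s + PySem.List.pyGetD (PySem.List.pyGetD board i []) (d - i) 0) s)
      = (fun (s d : Int) => s + ∑ i ∈ Finset.Ico (max 0 (d - (((PySem.List.pyGetD board 0 []).length : Int) - 1)))
                             (min d ((board.length : Int) - 1) + 1),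
              gcell board i (d - i)) := by
    funext s d
    exact hinner d s
  rw [houter, PySem.List.foldl_add, sum_map_pyRange]
  simp

-- diagonal reindexing: summing diagonal by diagonal hits exactly the cells with 0≤i<n, 0≤j<m, i+j≤k
theorem reindex (n m k : Int) (g : Int → Int → Int) :
    (∑ d ∈ Finset.Ico (0 : Int) (min k (n + m - 2) + 1),
       ∑ i ∈ Finset.Ico (max 0 (d - (m - 1))) (min d (n - 1) + 1), g i (d - i))
    = ∑ i ∈ Finset.Ico (0 : Int) n, ∑ j ∈ Finset.Ico (0 : Int) m,
        (if i + j ≤ k then g i j else 0) := by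
  rw [Finset.sum_sigma' (Finset.Ico (0 : Int) (min k (n + m - 2) + 1))
        (fun d => Finset.Ico (max 0 (d - (m - 1))) (min d (n - 1) + 1))
        (fun d i => g i (d - i))]
  rw [← Finset.sum_product' (Finset.Ico (0 : Int) n) (Finset.Ico (0 : Int) m)
        (fun i j => if i + j ≤ k then g i j else 0)]
  rw [← Finset.sum_filter (fun p : Int × Int => p.1 + p.2 ≤ k)
        (fun p : Int × Int => g p.1 p.2)]
  refine Finset.sum_nbij' (fun x => (x.2, x.1 - x.2)) (fun p => ⟨p.1 + p.2, p.1⟩) ?_ ?_ ?_ ?_ ?_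
  · intro a ha
    simp only [Finset.mem_sigma, Finset.mem_Ico] at ha
    simp only [Finset.mem_filter, Finset.mem_product, Finset.mem_Ico]
    omega
  · intro p hp
    simp only [Finset.mem_filter, Finset.mem_product, Finset.mem_Ico] at hp
    simp only [Finset.mem_sigma, Finset.mem_Ico]
    omega
  · intro a _
    simp
  · intro p _
    simp
  · intro a _
    simp

-- ===== VERDICT (by name: the statement is the Claim_ definition above) =====
theorem solution_spec : Claim_equal_solution := by
  intro board k _ _
  unfold Spec_solution
  rw [A_eq, B_eq, reindex]
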